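-- pv_equiv track=rewrite | github.com/michaelIf/likou | 数组/数组中两元素的最大乘积.py | way3
-- ===== SOURCE A (Python) =====
-- def way3(nums):
--     f = s = 1
--     for i in nums:
--         if i > f:
--             s = f
--             f = i
--         elif f >= i > s:
--             s = i
--     return (s-1) * (f-1)
-- ===== SOURCE B (Python) =====
-- def way3(nums):
--     srt = sorted(nums + [1, 1])
--     a, b = srt[-2], srt[-1]
--     return (a - 1) * (b - 1)
-- ===== Notes on version B (the rewrite author's own statement) =====
-- stated objective: simpler
-- what changed: replaces the hand-rolled top-two tracking scan with sorting the input extended by two unit sentinels and multiplying the decremented last two elements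
import Mathlib
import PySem

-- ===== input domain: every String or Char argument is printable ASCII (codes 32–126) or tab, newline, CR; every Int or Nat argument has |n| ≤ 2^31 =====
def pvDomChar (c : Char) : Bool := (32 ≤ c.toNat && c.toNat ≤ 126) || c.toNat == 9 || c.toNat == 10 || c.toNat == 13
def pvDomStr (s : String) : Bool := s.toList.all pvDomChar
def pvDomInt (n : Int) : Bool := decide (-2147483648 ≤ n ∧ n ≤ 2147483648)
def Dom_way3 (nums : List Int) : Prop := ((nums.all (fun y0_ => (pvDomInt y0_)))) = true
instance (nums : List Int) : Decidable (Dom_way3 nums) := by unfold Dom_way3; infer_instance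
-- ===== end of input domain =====

-- B: sort nums+[1,1] and multiply the decremented last two elements, instead of A's hand-rolled top-two scan (simpler, not faster).


-- ===== PORT A =====
-- loop body of A: p.1 = f, p.2 = s
def way3Step (p : Int × Int) (i : Int) : Int × Int :=
  if i > p.1 then (i, p.1) else if p.1 ≥ i ∧ i > p.2 then (p.1, i) else p

def way3 (nums : List Int) : Int :=
  let p := nums.foldl way3Step (1, 1)
  (p.2 - 1) * (p.1 - 1)

-- ===== PORT B =====
def way3_alt (nums : List Int) : Int :=
  let srt := PySem.List.sorted (nums ++ [1, 1]) (fun x => x) false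
  ((PySem.List.pyGet? srt (-2)).getD 0 - 1) * ((PySem.List.pyGet? srt (-1)).getD 0 - 1)

-- ===== PRECONDITION & SPEC =====
def Spec_way3 (nums : List Int) (out : Int) : Prop := out = way3_alt nums
instance (nums : List Int) (out : Int) : Decidable (Spec_way3 nums out) := by unfold Spec_way3; infer_instance

-- ===== CLAIM (what is proved, stated in full; the proofs are below) =====
def Claim_equal_way3 : Prop := ∀ (nums : List Int), Dom_way3 nums → Spec_way3 nums (way3 nums)

-- ===== LEMMAS AND PROOFS =====

theorem way3Step_low {f s i : Int} (hsf : s ≤ f) (h : i ≤ s) : way3Step (f, s) i = (f, s) := by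
  simp only [way3Step]
  rw [if_neg (by omega : ¬ i > f), if_neg (by omega : ¬ (f ≥ i ∧ i > s))]

theorem way3Step_mid {f s i : Int} (h1 : s < i) (h2 : i ≤ f) : way3Step (f, s) i = (f, i) := by
  simp only [way3Step]
  rw [if_neg (by omega : ¬ i > f), if_pos (by omega : f ≥ i ∧ i > s)]

theorem way3Step_high {f s i : Int} (h : f < i) : way3Step (f, s) i = (i, f) := by
  simp only [way3Step]
  rw [if_pos (by omega : i > f)]

-- inserting one element into a sorted list l ++ [s, f] updates the last two exactly as A's loop body does
theorem ins_one (l : List Int) (s f i : Int)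
    (h : (l ++ [s, f]).Pairwise (· ≤ ·)) :
    ∃ l', List.orderedInsert (· ≤ ·) i (l ++ [s, f])
        = l' ++ [(way3Step (f, s) i).2, (way3Step (f, s) i).1]
      ∧ (l' ++ [(way3Step (f, s) i).2, (way3Step (f, s) i).1]).Pairwise (· ≤ ·) := by
  induction l with
  | nil =>
    have hsf : s ≤ f := by simpa using h
    by_cases h1 : i ≤ s
    · rw [way3Step_low hsf h1]
      exact ⟨[i], by simp [h1], by simp [List.pairwise_cons]; omega⟩
    · by_cases h2 : i ≤ f
      · rw [way3Step_mid (f := f) (s := s) (i := i) (by omega) h2]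
        exact ⟨[s], by simp [h1, h2], by simp [List.pairwise_cons]; omega⟩
      · rw [way3Step_high (f := f) (s := s) (i := i) (by omega)]
        exact ⟨[s], by simp [h1, h2], by simp [List.pairwise_cons]; omega⟩
  | cons x l ih =>
    rw [List.cons_append] at h
    obtain ⟨hx, htail⟩ := List.pairwise_cons.mp h
    have hsf : s ≤ f := by
      have := (List.pairwise_append.mp htail).2.1
      simpa using this
    by_cases hix : i ≤ x
    · have hxs : x ≤ s := hx s (by simp)
      rw [way3Step_low hsf (le_trans hix hxs)]
      refine ⟨i :: x :: l, by simp [hix], ?_⟩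
      simp only [List.cons_append]
      refine List.pairwise_cons.mpr ⟨?_, h⟩
      intro b hb
      rcases List.mem_cons.mp hb with rfl | hb
      · exact hix
      · exact le_trans hix (hx b hb)
    · obtain ⟨l'', heq, hpw⟩ := ih htail
      refine ⟨x :: l'', by simp [hix, heq], ?_⟩
      simp only [List.cons_append]
      refine List.pairwise_cons.mpr ⟨?_, hpw⟩
      intro b hb
      have hb' : b ∈ List.orderedInsert (· ≤ ·) i (l ++ [s, f]) := by
        rw [heq]; simpa using hb
      rcases (List.mem_orderedInsert _).mp hb' with rfl | hb''
      · omega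
      · exact hx b hb''

-- main invariant: the fold of ordered inserts keeps A's (f, s) as the last two elements
theorem way3_loop_sorted : ∀ (nums l : List Int) (f s : Int),
    (l ++ [s, f]).Pairwise (· ≤ ·) →
    ∃ l', nums.foldl (fun acc i => List.orderedInsert (· ≤ ·) i acc) (l ++ [s, f])
        = l' ++ [(nums.foldl way3Step (f, s)).2, (nums.foldl way3Step (f, s)).1]
      ∧ (l' ++ [(nums.foldl way3Step (f, s)).2, (nums.foldl way3Step (f, s)).1]).Pairwise (· ≤ ·)
  | [], l, f, s, h => ⟨l, rfl, h⟩
  | i :: nums, l, f, s, h => by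
    obtain ⟨l₁, heq, hpw⟩ := ins_one l s f i h
    simp only [List.foldl_cons]
    rw [heq]
    have := way3_loop_sorted nums l₁ (way3Step (f, s) i).1 (way3Step (f, s) i).2 hpw
    simpa using this

theorem foldl_ins_perm : ∀ (nums acc : List Int),
    (nums.foldl (fun acc i => List.orderedInsert (· ≤ ·) i acc) acc).Perm (nums ++ acc)
  | [], acc => by simp
  | i :: nums, acc => by
    simp only [List.foldl_cons, List.cons_append]
    exact (foldl_ins_perm nums _).trans
      ((List.Perm.append_left _ (List.perm_orderedInsert _ i acc)).trans List.perm_middle)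

theorem get_penult (l : List Int) (a b : Int) :
    (l ++ [a, b])[(l ++ [a, b]).length - 2]? = some a := by
  have h1 : (l ++ [a, b]).length - 2 = l.length := by simp
  rw [h1, List.getElem?_append_right (le_refl l.length)]
  simp

-- ===== VERDICT (by name: the statement is the Claim_ definition above) =====
theorem way3_spec : Claim_equal_way3 := by
  intro nums _dom
  unfold Spec_way3 way3 way3_alt
  obtain ⟨l', heq, hpw⟩ := way3_loop_sorted nums [] 1 1 (by simp)
  simp only [List.nil_append] at heq hpw
  set F := (nums.foldl way3Step (1, 1)).1 with hF
  set S := (nums.foldl way3Step (1, 1)).2 with hS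
  have hperm : (l' ++ [S, F]).Perm (nums ++ [1, 1]) := heq ▸ foldl_ins_perm nums [1, 1]
  have hsorted : PySem.List.sorted (nums ++ [1, 1]) (fun x => x) false = l' ++ [S, F] :=
    PySem.List.sorted_id_eq_of_perm_of_pairwise _ _ hperm hpw
  rw [hsorted]
  have hlen : 2 ≤ (l' ++ [S, F]).length := by simp
  have hm1 : PySem.List.pyGet? (l' ++ [S, F]) (-1) = some F := by
    have : l' ++ [S, F] = (l' ++ [S]) ++ [F] := by simp
    rw [this, PySem.List.pyGet?_neg_one_append_singleton]
  have hm2 : PySem.List.pyGet? (l' ++ [S, F]) (-2) = some S := by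
    rw [PySem.List.pyGet?_neg_ofNat _ 2 (by omega) (by omega), get_penult]
  simp [hm1, hm2]
  rfl
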